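-- pv_equiv track=rewrite | github.com/jokajak/advent_of_code | 2020/day_18/test_18.py | prepare_expression
-- ===== SOURCE A (Python) =====
-- def prepare_expression(expression):
--     for index, val in enumerate(expression):
--         if "(" in val and val != "(":
--             new_val = val.split("(")
--             for i, result in enumerate(new_val):
--                 if result == "":
--                     new_val[i] = "("
--             expression[index:index+1] = new_val
--             return prepare_expression(expression)
--         if ")" in val and val != ")":
--             new_val = val.split(")")
--             for i, result in enumerate(new_val):
--                 if result == "":
--                     new_val[i] = ")"
--             expression[index:index+1] = new_val
--             return prepare_expression(expression)
--     return expression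
-- ===== SOURCE B (Python) =====
-- def prepare_expression(expression):
--     # One forward pass; expands each token independently. Note: unlike A,
--     # this does not mutate the input list in place (return value is identical).
--     out = []
--     for tok in expression:
--         if "(" in tok and tok != "(":
--             for part in tok.split("("):
--                 if part == "":
--                     out.append("(")
--                 elif ")" in part and part != ")":
--                     out.extend(p if p != "" else ")" for p in part.split(")"))
--                 else:
--                     out.append(part)
--         elif ")" in tok and tok != ")":
--             out.extend(p if p != "" else ")" for p in tok.split(")"))
--         else:
--             out.append(tok)
--     return out
-- ===== Notes on version B (the rewrite author's own statement) =====
-- stated objective: alternative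
-- what changed: A repeatedly rescans the token list from index 0 after every single split-splice (restart recursion, quadratic in the worst case); B makes one forward pass, expanding each token independently with the same per-token split logic, visiting each token once.
import Mathlib
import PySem

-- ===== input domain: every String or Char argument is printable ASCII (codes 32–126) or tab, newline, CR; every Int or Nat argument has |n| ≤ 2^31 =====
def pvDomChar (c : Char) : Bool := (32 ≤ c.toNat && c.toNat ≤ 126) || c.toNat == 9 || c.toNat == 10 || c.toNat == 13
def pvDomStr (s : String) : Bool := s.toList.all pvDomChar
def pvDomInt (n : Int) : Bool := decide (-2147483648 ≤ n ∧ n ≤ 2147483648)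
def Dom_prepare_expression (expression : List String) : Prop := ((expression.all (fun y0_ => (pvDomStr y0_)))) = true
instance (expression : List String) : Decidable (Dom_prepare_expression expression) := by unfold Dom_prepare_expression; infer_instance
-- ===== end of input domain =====

-- B replaces A's restart-from-scratch recursion by a single forward pass expanding each
-- token independently (objective: alternative). A mutates its argument list in place via
-- slice assignment; B does not — the equivalence proved here is about the RETURN value only.

-- ===== PORT A =====

-- val.split(sep) for a NON-EMPTY literal sep (Python raises only for sep = "", never reached here);
-- exact: PySem.Str.split? unfolds to exactly this for nonempty sep.
def pvSplit (s sep : String) : List String :=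
  (PySem.Chars.splitOn s.toList sep.toList).map String.ofList

-- the inner 'for i, result in enumerate(new_val): if result == "": new_val[i] = sep'
def pvFix (sep : String) (parts : List String) : List String :=
  parts.map (fun r => if r = "" then sep else r)

-- termination measure for A's restart recursion: parentheses inside non-pure tokens
def pvW (t : String) : Nat :=
  if t = "(" ∨ t = ")" then 0 else t.toList.count '(' + t.toList.count ')'

def pvNu (e : List String) : Nat := (e.map pvW).sum

-- the 'for index, val in enumerate(expression)' scan: first violating token spliced, or none
def pvScan : List String → Option (List String)
  | [] => none
  | v :: rest =>
    if PySem.Str.isIn "(" v = true ∧ v ≠ "(" then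
      some (pvFix "(" (pvSplit v "(") ++ rest)
    else if PySem.Str.isIn ")" v = true ∧ v ≠ ")" then
      some (pvFix ")" (pvSplit v ")") ++ rest)
    else (pvScan rest).map (v :: ·)

-- structural single-char split (the shape splitOn takes for a one-char separator)
def pvSplitCh (sep : Char) : List Char → List (List Char)
  | [] => [[]]
  | c :: rest =>
    if c = sep then [] :: pvSplitCh sep rest
    else
      match pvSplitCh sep rest with
      | [] => [[c]]
      | p :: ps => (c :: p) :: ps

theorem pvSplitCh_ne_nil (sep : Char) (l : List Char) : pvSplitCh sep l ≠ [] := by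
  induction l with
  | nil => simp [pvSplitCh]
  | cons c rest ih =>
    simp only [pvSplitCh]
    split
    · simp
    · split <;> simp_all

def pvConsH (x : List Char) : List (List Char) → List (List Char)
  | [] => [x]
  | p :: ps => (x ++ p) :: ps

theorem pvSplitOn_go_eq (sep : Char) :
    ∀ (fuel : Nat) (l cur : List Char) (acc : List (List Char)), l.length < fuel →
      PySem.Chars.splitOn.go [sep] fuel l cur acc
        = acc.reverse ++ pvConsH cur.reverse (pvSplitCh sep l) := by
  intro fuel
  induction fuel with
  | zero => intro l cur acc h; omega
  | succ fuel ih =>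
    intro l cur acc h
    match l with
    | [] =>
      rw [PySem.Chars.splitOn.go.eq_def]
      simp [pvSplitCh, pvConsH]
    | c :: rest =>
      rw [PySem.Chars.splitOn.go.eq_def]
      simp only [List.isPrefixOf, List.length_cons] at *
      by_cases hc : c = sep
      · subst hc
        simp only [BEq.rfl, Bool.true_and, if_pos, List.length_nil,
          Nat.zero_add, List.drop_succ_cons, List.drop_zero]
        rw [ih rest [] (cur.reverse :: acc) (by omega)]
        simp [pvSplitCh]
        cases hs : pvSplitCh c rest with
        | nil => exact absurd hs (pvSplitCh_ne_nil c rest)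
        | cons p ps => simp [pvConsH]
      · have hb : (sep == c) = false := by simp; exact fun h => hc h.symm
        simp only [hb, Bool.false_and, Bool.false_eq_true, if_false]
        rw [ih rest (c :: cur) acc (by omega)]
        simp only [pvSplitCh, if_neg hc]
        cases hs : pvSplitCh sep rest with
        | nil => exact absurd hs (pvSplitCh_ne_nil sep rest)
        | cons p ps => simp [pvConsH]

theorem pvSplitOn_eq (sep : Char) (l : List Char) :
    PySem.Chars.splitOn l [sep] = pvSplitCh sep l := by
  have h := pvSplitOn_go_eq sep (l.length + 1) l [] [] (by omega)
  unfold PySem.Chars.splitOn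
  rw [h]
  cases hs : pvSplitCh sep l with
  | nil => exact absurd hs (pvSplitCh_ne_nil sep l)
  | cons p ps => simp [pvConsH]

theorem pvSplitCh_no_sep (sep : Char) (l : List Char) :
    ∀ p ∈ pvSplitCh sep l, sep ∉ p := by
  induction l with
  | nil => simp [pvSplitCh]
  | cons c rest ih =>
    simp only [pvSplitCh]
    split
    · intro p hp
      rcases List.mem_cons.1 hp with rfl | hp
      · simp
      · exact ih p hp
    · rename_i hc
      cases hs : pvSplitCh sep rest with
      | nil => exact absurd hs (pvSplitCh_ne_nil sep rest)
      | cons q qs =>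
        intro p hp
        rcases List.mem_cons.1 hp with rfl | hp
        · have hq : sep ∉ q := ih q (by rw [hs]; exact List.mem_cons_self)
          simp only [List.mem_cons]
          rintro (rfl | h)
          · exact hc rfl
          · exact hq h
        · exact ih p (by rw [hs]; exact List.mem_cons_of_mem _ hp)

theorem pvSplitCh_subset (sep : Char) (l : List Char) :
    ∀ p ∈ pvSplitCh sep l, ∀ c ∈ p, c ∈ l := by
  induction l with
  | nil => simp [pvSplitCh]
  | cons c rest ih =>
    simp only [pvSplitCh]
    split
    · intro p hp
      rcases List.mem_cons.1 hp with rfl | hp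
      · simp
      · exact fun d hd => List.mem_cons_of_mem _ (ih p hp d hd)
    · cases hs : pvSplitCh sep rest with
      | nil => exact absurd hs (pvSplitCh_ne_nil sep rest)
      | cons q qs =>
        intro p hp
        rcases List.mem_cons.1 hp with rfl | hp
        · intro d hd
          rcases List.mem_cons.1 hd with rfl | hd
          · exact List.mem_cons_self
          · exact List.mem_cons_of_mem _ (ih q (by rw [hs]; exact List.mem_cons_self) d hd)
        · exact fun d hd => List.mem_cons_of_mem _ (ih p (by rw [hs]; exact List.mem_cons_of_mem _ hp) d hd)

theorem pvSplitCh_count (sep c : Char) (hne : c ≠ sep) (l : List Char) :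
    ((pvSplitCh sep l).map (fun p => p.count c)).sum = l.count c := by
  induction l with
  | nil => simp [pvSplitCh]
  | cons d rest ih =>
    simp only [pvSplitCh]
    split
    · rename_i hd
      subst hd
      simp only [List.map_cons, List.sum_cons, List.count_nil, Nat.zero_add, ih]
      rw [List.count_cons_of_ne (Ne.symm hne)]
    · cases hs : pvSplitCh sep rest with
      | nil => exact absurd hs (pvSplitCh_ne_nil sep rest)
      | cons q qs =>
        rw [hs] at ih
        simp only [List.map_cons, List.sum_cons, List.count_cons] at *
        omega

theorem pvIsIn_char (c : Char) (s : String) :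
    PySem.Str.isIn (String.ofList [c]) s = true ↔ c ∈ s.toList := by
  rw [PySem.Str.isIn_iff_infix]
  have : (String.ofList [c]).toList = [c] := by simp
  rw [this, List.singleton_infix_iff]

-- mem/count bridge used repeatedly
theorem pvCount_pos_of_mem {c : Char} {l : List Char} (h : c ∈ l) : 0 < l.count c :=
  List.count_pos_iff.2 h

-- the termination fact A's recursion needs: one splice strictly decreases pvNu
theorem pvScan_nu_lt : ∀ {e e' : List String}, pvScan e = some e' → pvNu e' < pvNu e := by
  intro e
  induction e with
  | nil => intro e' h; simp [pvScan] at h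
  | cons v rest ih =>
    intro e' h
    simp only [pvScan] at h
    split at h
    · rename_i hb1
      obtain ⟨hin, hne⟩ := hb1
      have hmem : '(' ∈ v.toList := by
        have := (pvIsIn_char '(' v).1
        simpa using this hin
      injection h with h
      subst h
      have hvne : v ≠ ")" := by
        rintro rfl
        simp at hmem
      simp only [pvNu, List.map_append, List.sum_append, List.map_cons, List.sum_cons]
      have hkey : pvNu (pvFix "(" (pvSplit v "(")) < pvW v := by
        have hsplit : pvSplit v "(" = (pvSplitCh '(' v.toList).map String.ofList := by
          unfold pvSplit
          have : ("(" : String).toList = ['('] := by decide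
          rw [this, pvSplitOn_eq]
        have hcnt := pvSplitCh_count '(' ')' (by decide) v.toList
        have hbound : pvNu (pvFix "(" (pvSplit v "(")) ≤ v.toList.count ')' := by
          rw [hsplit]
          unfold pvNu pvFix
          rw [← hcnt]
          simp only [List.map_map]
          apply List.sum_le_sum
          intro p hp
          simp only [Function.comp_apply]
          have hnosep : '(' ∉ p := pvSplitCh_no_sep '(' v.toList p hp
          by_cases hp0 : String.ofList p = ""
          · simp [hp0, pvW]
          · simp only [if_neg hp0]
            unfold pvW
            split
            · omega
            · have : (String.ofList p).toList = p := by simp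
              rw [this]
              have : p.count '(' = 0 := List.count_eq_zero.2 hnosep
              omega
        have hw : pvW v = v.toList.count '(' + v.toList.count ')' := by
          unfold pvW
          rw [if_neg (not_or.mpr ⟨hne, hvne⟩)]
        have := pvCount_pos_of_mem hmem
        omega
      simp only [pvNu] at hkey
      omega
    · split at h
      · rename_i hnb1 hb2
        obtain ⟨hin, hne⟩ := hb2
        have hmem : ')' ∈ v.toList := by
          have := (pvIsIn_char ')' v).1
          simpa using this hin
        injection h with h
        subst h
        have hvnp : v ≠ "(" := by
          rintro rfl
          simp at hmem
        have hnoin : '(' ∉ v.toList := by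
          intro hc
          apply hnb1
          refine ⟨?_, hvnp⟩
          have := (pvIsIn_char '(' v).2 hc
          simpa using this
        simp only [pvNu, List.map_append, List.sum_append, List.map_cons, List.sum_cons]
        have hkey : pvNu (pvFix ")" (pvSplit v ")")) < pvW v := by
          have hsplit : pvSplit v ")" = (pvSplitCh ')' v.toList).map String.ofList := by
            unfold pvSplit
            have : (")" : String).toList = [')'] := by decide
            rw [this, pvSplitOn_eq]
          have hzero : pvNu (pvFix ")" (pvSplit v ")")) = 0 := by
            rw [hsplit]
            unfold pvNu pvFix
            simp only [List.map_map]
            apply List.sum_eq_zero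
            intro x hx
            simp only [List.mem_map, Function.comp_apply] at hx
            obtain ⟨p, hp, rfl⟩ := hx
            have hnosep : ')' ∉ p := pvSplitCh_no_sep ')' v.toList p hp
            have hnop : '(' ∉ p := fun hc => hnoin (pvSplitCh_subset ')' v.toList p hp '(' hc)
            by_cases hp0 : String.ofList p = ""
            · simp [hp0, pvW]
            · simp only [if_neg hp0]
              unfold pvW
              split
              · rfl
              · have hpl : (String.ofList p).toList = p := by simp
                rw [hpl]
                simp [List.count_eq_zero.2 hnop, List.count_eq_zero.2 hnosep]
          have hw : 0 < pvW v := by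
            unfold pvW
            rw [if_neg (not_or.mpr ⟨hvnp, hne⟩)]
            have := pvCount_pos_of_mem hmem
            omega
          omega
        simp only [pvNu] at hkey
        omega
      · cases hr : pvScan rest with
        | none => rw [hr] at h; simp at h
        | some r' =>
          rw [hr] at h
          simp only [Option.map_some] at h
          injection h with h
          subst h
          have := ih hr
          simp only [pvNu, List.map_cons, List.sum_cons] at *
          omega

-- port of A: find the first token to split, splice, restart (Python's recursive restart)
def prepare_expression (expression : List String) : List String :=
  match h : pvScan expression with
  | some e' => prepare_expression e'
  | none => expression
termination_by pvNu expression
decreasing_by exact pvScan_nu_lt h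

-- ===== PORT B =====

-- port of B (Source B): one forward pass; out.extend(p if p != "" else ")" for p in part.split(")"))
def prepare_expression_alt (expression : List String) : List String :=
  expression.foldl (fun out tok =>
    if PySem.Str.isIn "(" tok = true ∧ tok ≠ "(" then
      out ++ (pvSplit tok "(").flatMap (fun part =>
        if part = "" then ["("]
        else if PySem.Str.isIn ")" part = true ∧ part ≠ ")" then
          (pvSplit part ")").map (fun p => if p ≠ "" then p else ")")
        else [part])
    else if PySem.Str.isIn ")" tok = true ∧ tok ≠ ")" then
      out ++ (pvSplit tok ")").map (fun p => if p ≠ "" then p else ")")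
    else out ++ [tok]) []

-- ===== PRECONDITION & SPEC =====
def Spec_prepare_expression (expression : List String) (out : List String) : Prop := out = prepare_expression_alt expression
instance (expression : List String) (out : List String) : Decidable (Spec_prepare_expression expression out) := by unfold Spec_prepare_expression; infer_instance

-- ===== CLAIM (what is proved, stated in full; the proofs are below) =====
def Claim_equal_prepare_expression : Prop := ∀ (expression : List String), Dom_prepare_expression expression → Spec_prepare_expression expression (prepare_expression expression)

-- ===== LEMMAS AND PROOFS =====

-- B's per-token expansion, named for the proofs
def pvExpand (tok : String) : List String :=
  if PySem.Str.isIn "(" tok = true ∧ tok ≠ "(" then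
    (pvSplit tok "(").flatMap (fun part =>
      if part = "" then ["("]
      else if PySem.Str.isIn ")" part = true ∧ part ≠ ")" then
        (pvSplit part ")").map (fun p => if p ≠ "" then p else ")")
      else [part])
  else if PySem.Str.isIn ")" tok = true ∧ tok ≠ ")" then
    (pvSplit tok ")").map (fun p => if p ≠ "" then p else ")")
  else [tok]

theorem pvAlt_eq_flatMap (e : List String) : prepare_expression_alt e = e.flatMap pvExpand := by
  unfold prepare_expression_alt
  have hb : (fun (out : List String) (tok : String) =>
      if PySem.Str.isIn "(" tok = true ∧ tok ≠ "(" then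
        out ++ (pvSplit tok "(").flatMap (fun part =>
          if part = "" then ["("]
          else if PySem.Str.isIn ")" part = true ∧ part ≠ ")" then
            (pvSplit part ")").map (fun p => if p ≠ "" then p else ")")
          else [part])
      else if PySem.Str.isIn ")" tok = true ∧ tok ≠ ")" then
        out ++ (pvSplit tok ")").map (fun p => if p ≠ "" then p else ")")
      else out ++ [tok])
      = fun (out : List String) (tok : String) => out ++ pvExpand tok := by
    funext out tok
    unfold pvExpand
    split_ifs <;> rfl
  rw [hb, PySem.List.foldl_append_eq_flatMap]
  simp

theorem pvExpand_paren : pvExpand "(" = ["("] := by decide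

theorem pvExpand_cparen : pvExpand ")" = [")"] := by decide

-- splicing the "(" split of a violating token does not change the flatMap expansion
theorem pvStep_l {v : String} (hin : PySem.Str.isIn "(" v = true) (hne : v ≠ "(") :
    (pvFix "(" (pvSplit v "(")).flatMap pvExpand = pvExpand v := by
  have hsplit : pvSplit v "(" = (pvSplitCh '(' v.toList).map String.ofList := by
    unfold pvSplit
    have : ("(" : String).toList = ['('] := by decide
    rw [this, pvSplitOn_eq]
  conv_rhs => rw [pvExpand, if_pos ⟨hin, hne⟩]
  rw [hsplit]
  unfold pvFix
  simp only [List.map_map, List.flatMap_map]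
  apply List.flatMap_congr
  intro p hp
  have hnosep : '(' ∉ p := pvSplitCh_no_sep '(' v.toList p hp
  simp only [Function.comp_apply]
  by_cases hp0 : String.ofList p = ""
  · rw [if_pos hp0, if_pos hp0, pvExpand_paren]
  · rw [if_neg hp0, if_neg hp0]
    have hnin : ¬ (PySem.Str.isIn "(" (String.ofList p) = true ∧ String.ofList p ≠ "(") := by
      rintro ⟨hc, -⟩
      exact hnosep (by
        have := (pvIsIn_char '(' (String.ofList p)).1 (by simpa using hc)
        simpa using this)
    rw [pvExpand, if_neg hnin]

-- splicing the ")" split (token contains no "(") does not change the flatMap expansion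
theorem pvStep_r {v : String} (hnb1 : ¬(PySem.Str.isIn "(" v = true ∧ v ≠ "("))
    (hin : PySem.Str.isIn ")" v = true) (hne : v ≠ ")") :
    (pvFix ")" (pvSplit v ")")).flatMap pvExpand = pvExpand v := by
  have hmem : ')' ∈ v.toList := by
    have := (pvIsIn_char ')' v).1
    simpa using this hin
  have hvnp : v ≠ "(" := by
    rintro rfl
    simp at hmem
  have hnoin : '(' ∉ v.toList := by
    intro hc
    apply hnb1
    refine ⟨?_, hvnp⟩
    have := (pvIsIn_char '(' v).2 hc
    simpa using this
  have hsplit : pvSplit v ")" = (pvSplitCh ')' v.toList).map String.ofList := by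
    unfold pvSplit
    have : (")" : String).toList = [')'] := by decide
    rw [this, pvSplitOn_eq]
  conv_rhs => rw [pvExpand, if_neg hnb1, if_pos ⟨hin, hne⟩]
  rw [hsplit]
  unfold pvFix
  simp only [List.map_map, List.flatMap_map]
  calc (pvSplitCh ')' v.toList).flatMap
        (fun p => pvExpand (((fun r => if r = "" then ")" else r) ∘ String.ofList) p))
      = (pvSplitCh ')' v.toList).flatMap
        (fun p => [((fun q => if q ≠ "" then q else ")") ∘ String.ofList) p]) := by
        apply List.flatMap_congr
        intro p hp
        have hnosep : ')' ∉ p := pvSplitCh_no_sep ')' v.toList p hp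
        have hnop : '(' ∉ p := fun hc => hnoin (pvSplitCh_subset ')' v.toList p hp '(' hc)
        simp only [Function.comp_apply]
        by_cases hp0 : String.ofList p = ""
        · rw [if_pos hp0, if_neg (by simp [hp0]), pvExpand_cparen]
        · rw [if_neg hp0, if_pos hp0]
          have hnin1 : ¬ (PySem.Str.isIn "(" (String.ofList p) = true ∧ String.ofList p ≠ "(") := by
            rintro ⟨hc, -⟩
            exact hnop (by
              have := (pvIsIn_char '(' (String.ofList p)).1 (by simpa using hc)
              simpa using this)
          have hnin2 : ¬ (PySem.Str.isIn ")" (String.ofList p) = true ∧ String.ofList p ≠ ")") := by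
            rintro ⟨hc, -⟩
            exact hnosep (by
              have := (pvIsIn_char ')' (String.ofList p)).1 (by simpa using hc)
              simpa using this)
          rw [pvExpand, if_neg hnin1, if_neg hnin2]
    _ = (pvSplitCh ')' v.toList).map ((fun q => if q ≠ "" then q else ")") ∘ String.ofList) := by
        rw [← List.map_eq_flatMap]

theorem pvExpand_clean {v : String} (hnb1 : ¬(PySem.Str.isIn "(" v = true ∧ v ≠ "("))
    (hnb2 : ¬(PySem.Str.isIn ")" v = true ∧ v ≠ ")")) : pvExpand v = [v] := by
  unfold pvExpand
  rw [if_neg hnb1, if_neg hnb2]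

theorem pvScan_none {e : List String} (h : pvScan e = none) : e.flatMap pvExpand = e := by
  induction e with
  | nil => simp
  | cons v rest ih =>
    simp only [pvScan] at h
    split at h
    · exact absurd h (by simp)
    · split at h
      · exact absurd h (by simp)
      · rename_i hnb1 hnb2
        cases hr : pvScan rest with
        | none =>
          simp only [List.flatMap_cons, pvExpand_clean hnb1 hnb2, ih hr]
          rfl
        | some r' => rw [hr] at h; simp at h

theorem pvScan_some {e e' : List String} (h : pvScan e = some e') :
    e'.flatMap pvExpand = e.flatMap pvExpand := by
  induction e generalizing e' with
  | nil => simp [pvScan] at h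
  | cons v rest ih =>
    simp only [pvScan] at h
    split at h
    · rename_i hb1
      injection h with h
      subst h
      rw [List.flatMap_append, List.flatMap_cons, pvStep_l hb1.1 hb1.2]
    · split at h
      · rename_i hnb1 hb2
        injection h with h
        subst h
        rw [List.flatMap_append, List.flatMap_cons, pvStep_r hnb1 hb2.1 hb2.2]
      · cases hr : pvScan rest with
        | none => rw [hr] at h; simp at h
        | some r' =>
          rw [hr] at h
          simp only [Option.map_some] at h
          injection h with h
          subst h
          simp only [List.flatMap_cons, ih hr]

theorem pvMain : ∀ (n : Nat) (e : List String), pvNu e ≤ n → prepare_expression e = e.flatMap pvExpand := by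
  intro n
  induction n with
  | zero =>
    intro e he
    rw [prepare_expression.eq_def]
    split
    · rename_i e' h
      exact absurd (pvScan_nu_lt h) (by omega)
    · rename_i h
      exact (pvScan_none h).symm
  | succ n ih =>
    intro e he
    rw [prepare_expression.eq_def]
    split
    · rename_i e' h
      have := pvScan_nu_lt h
      rw [ih e' (by omega), pvScan_some h]
    · rename_i h
      exact (pvScan_none h).symm

-- ===== VERDICT (by name: the statement is the Claim_ definition above) =====
theorem prepare_expression_spec : Claim_equal_prepare_expression := by
  intro e _
  unfold Spec_prepare_expression
  rw [pvAlt_eq_flatMap, pvMain (pvNu e) e le_rfl]
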